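-- pv_equiv track=rewrite | github.com/johnyork1/ridgemont-agents | agents/master-agent/Make Videos/scripts/analyze_catalog.py | apply_priority_chain
-- ===== SOURCE A (Python) =====
-- def apply_priority_chain(creative_brief, artist_profile, mood_result, genre_defaults):
--     """
--     Apply the priority chain for visual decisions:
--     1. Creative Brief (highest)
--     2. Artist Profile
--     3. Mood Map (if analysis reliable)
--     4. Genre Defaults
--     5. System Default (happy/thumbs_up)
--     """
--     result = {
--         "weeter_pose": "assets/characters/weeter/happy/thumbs_up.png",
--         "blubby_pose": "assets/characters/blubby/happy/excited_stars.png",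
--         "together_pose": "assets/characters/together/happy/thumbs_up_duo.png",
--         "meme_sign_template": "assets/characters/together/meme_sign/blank_sign.png"
--     }
--
--     # Layer 4: Genre defaults
--     if genre_defaults:
--         for key in result:
--             if key in genre_defaults:
--                 result[key] = genre_defaults[key]
--
--     # Layer 3: Mood map
--     if mood_result and mood_result[0]:
--         _, w_pose, b_pose, t_pose = mood_result
--         if w_pose:
--             result["weeter_pose"] = w_pose
--         if b_pose:
--             result["blubby_pose"] = b_pose
--         if t_pose:
--             result["together_pose"] = t_pose
--
--     # Layer 2: Artist profile
--     if artist_profile: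
--         wb = artist_profile.get("weeter_blubby_override", {})
--         for key in ["weeter_pose", "blubby_pose", "together_pose"]:
--             if key in wb:
--                 result[key] = wb[key]
--
--     # Layer 1: Creative brief (highest priority)
--     if creative_brief:
--         wb = creative_brief.get("character_override", {})
--         for key in ["weeter_pose", "blubby_pose", "together_pose"]:
--             if key in wb:
--                 result[key] = wb[key]
--
--     return result
-- ===== SOURCE B (Python) =====
-- # Per-key first-match resolution over prioritized sources, instead of
-- # building a dict and repeatedly overwriting it layer by layer.
--
-- _DEFAULTS = (
--     ("weeter_pose", "assets/characters/weeter/happy/thumbs_up.png"),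
--     ("blubby_pose", "assets/characters/blubby/happy/excited_stars.png"),
--     ("together_pose", "assets/characters/together/happy/thumbs_up_duo.png"),
--     ("meme_sign_template", "assets/characters/together/meme_sign/blank_sign.png"),
-- )
--
--
-- def apply_priority_chain(creative_brief, artist_profile, mood_result, genre_defaults):
--     brief = creative_brief.get("character_override", {}) if creative_brief else {}
--     artist = artist_profile.get("weeter_blubby_override", {}) if artist_profile else {}
--     genre = genre_defaults or {}
--     mood = {}
--     if mood_result and mood_result[0]:
--         for k, p in zip(("weeter_pose", "blubby_pose", "together_pose"), mood_result[1:]):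
--             if p:
--                 mood[k] = p
--
--     def resolve(key, default):
--         if key != "meme_sign_template":
--             for src in (brief, artist, mood):
--                 if key in src:
--                     return src[key]
--         if key in genre:
--             return genre[key]
--         return default
--
--     return {k: resolve(k, d) for k, d in _DEFAULTS}
-- ===== Notes on version B (the rewrite author's own statement) =====
-- stated objective: alternative
-- what changed: B resolves each of the four output keys independently by first-match over the prioritized sources (brief override, artist override, mood dict, genre defaults, hardcoded default), instead of A's building a default dict and destructively overwriting it layer by layer from lowest to highest priority.
import Mathlib
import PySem

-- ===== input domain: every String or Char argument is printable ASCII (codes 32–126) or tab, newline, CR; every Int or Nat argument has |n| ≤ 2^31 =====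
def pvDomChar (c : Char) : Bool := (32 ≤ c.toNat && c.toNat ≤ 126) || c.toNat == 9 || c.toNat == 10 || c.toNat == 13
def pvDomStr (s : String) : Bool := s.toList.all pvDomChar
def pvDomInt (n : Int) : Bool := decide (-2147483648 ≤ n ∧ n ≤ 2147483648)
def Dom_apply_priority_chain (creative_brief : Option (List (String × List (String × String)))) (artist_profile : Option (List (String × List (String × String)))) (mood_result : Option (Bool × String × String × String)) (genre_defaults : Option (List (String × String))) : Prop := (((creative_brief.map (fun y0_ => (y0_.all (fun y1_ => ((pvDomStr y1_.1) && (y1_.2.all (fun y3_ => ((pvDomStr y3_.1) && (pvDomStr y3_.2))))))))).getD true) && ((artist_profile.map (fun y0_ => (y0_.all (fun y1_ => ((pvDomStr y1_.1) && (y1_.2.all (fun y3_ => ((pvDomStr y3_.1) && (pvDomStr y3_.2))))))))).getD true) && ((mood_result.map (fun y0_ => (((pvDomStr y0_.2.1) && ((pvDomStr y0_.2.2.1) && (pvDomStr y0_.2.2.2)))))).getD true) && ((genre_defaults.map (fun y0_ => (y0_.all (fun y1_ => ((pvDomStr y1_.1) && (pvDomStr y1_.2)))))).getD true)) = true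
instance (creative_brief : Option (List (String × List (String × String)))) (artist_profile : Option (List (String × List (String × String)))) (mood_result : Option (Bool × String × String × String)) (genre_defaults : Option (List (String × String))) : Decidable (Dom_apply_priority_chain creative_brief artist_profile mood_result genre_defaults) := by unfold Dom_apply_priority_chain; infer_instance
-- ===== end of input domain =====

-- ===== PORT A =====
-- B per-key first-match resolution instead of A's layered dict overwriting; objective: alternative decomposition (no speed claim).
-- A-side helpers: the system-default dict and the two layer shapes of A's code.
def pvBase : PySem.Dict String String := PySem.Dict.mk
  [("weeter_pose", "assets/characters/weeter/happy/thumbs_up.png"),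
   ("blubby_pose", "assets/characters/blubby/happy/excited_stars.png"),
   ("together_pose", "assets/characters/together/happy/thumbs_up_duo.png"),
   ("meme_sign_template", "assets/characters/together/meme_sign/blank_sign.png")]

def pvPoseKeys : List String := ["weeter_pose", "blubby_pose", "together_pose"]

-- `for key in ks: if key in src: result[key] = src[key]` (the guard ensures presence, so `src[key]` is `src.getD key ""`)
def pvOverlay (src : PySem.Dict String String) (ks : List String) (r : PySem.Dict String String) : PySem.Dict String String :=
  ks.foldl (fun r key => if src.contains key then r.insert key (src.getD key "") else r) r

-- Layer 3 of A: the three truthiness-guarded pose assignments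
def pvMoodLayer (w_pose b_pose t_pose : String) (r : PySem.Dict String String) : PySem.Dict String String :=
  let r := if w_pose ≠ "" then r.insert "weeter_pose" w_pose else r
  let r := if b_pose ≠ "" then r.insert "blubby_pose" b_pose else r
  if t_pose ≠ "" then r.insert "together_pose" t_pose else r

def pvADict (creative_brief artist_profile : Option (List (String × List (String × String)))) (mood_result : Option (Bool × String × String × String)) (genre_defaults : Option (List (String × String))) : PySem.Dict String String :=
  let result := pvBase
  -- Layer 4: genre defaults (`if genre_defaults:` = present and non-empty)
  let result := match genre_defaults with
    | some g => if g ≠ [] then pvOverlay (PySem.Dict.mk g) result.keys result else result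
    | none => result
  -- Layer 3: mood map
  let result := match mood_result with
    | some (flag, w_pose, b_pose, t_pose) => if flag then pvMoodLayer w_pose b_pose t_pose result else result
    | none => result
  -- Layer 2: artist profile
  let result := match artist_profile with
    | some a => if a ≠ [] then pvOverlay (PySem.Dict.mk ((PySem.Dict.mk a).getD "weeter_blubby_override" [])) pvPoseKeys result else result
    | none => result
  -- Layer 1: creative brief
  match creative_brief with
  | some c => if c ≠ [] then pvOverlay (PySem.Dict.mk ((PySem.Dict.mk c).getD "character_override" [])) pvPoseKeys result else result
  | none => result

def apply_priority_chain (creative_brief : Option (List (String × List (String × String)))) (artist_profile : Option (List (String × List (String × String)))) (mood_result : Option (Bool × String × String × String)) (genre_defaults : Option (List (String × String))) : List (String × String) :=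
  (pvADict creative_brief artist_profile mood_result genre_defaults).items

-- ===== PORT B =====
-- B-side helpers: the prioritized sources as dicts, and the per-key resolver.
def pvDefaults : List (String × String) :=
  [("weeter_pose", "assets/characters/weeter/happy/thumbs_up.png"),
   ("blubby_pose", "assets/characters/blubby/happy/excited_stars.png"),
   ("together_pose", "assets/characters/together/happy/thumbs_up_duo.png"),
   ("meme_sign_template", "assets/characters/together/meme_sign/blank_sign.png")]

def pvBriefOf (creative_brief : Option (List (String × List (String × String)))) : PySem.Dict String String :=
  PySem.Dict.mk (match creative_brief with
    | some c => if c ≠ [] then (PySem.Dict.mk c).getD "character_override" [] else []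
    | none => [])

def pvArtistOf (artist_profile : Option (List (String × List (String × String)))) : PySem.Dict String String :=
  PySem.Dict.mk (match artist_profile with
    | some a => if a ≠ [] then (PySem.Dict.mk a).getD "weeter_blubby_override" [] else []
    | none => [])

def pvGenreOf (genre_defaults : Option (List (String × String))) : PySem.Dict String String :=
  PySem.Dict.mk (match genre_defaults with | some g => g | none => [])

def pvMoodOf (mood_result : Option (Bool × String × String × String)) : PySem.Dict String String :=
  match mood_result with
  | some (flag, w_pose, b_pose, t_pose) =>
    if flag then
      (List.zip ["weeter_pose", "blubby_pose", "together_pose"] [w_pose, b_pose, t_pose]).foldl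
        (fun d kp => if kp.2 ≠ "" then d.insert kp.1 kp.2 else d) PySem.Dict.empty
    else PySem.Dict.empty
  | none => PySem.Dict.empty

def pvGenreOr (genre : PySem.Dict String String) (key dflt : String) : String :=
  if genre.contains key then genre.getD key "" else dflt

def pvResolve (brief artist mood genre : PySem.Dict String String) (key dflt : String) : String :=
  if key ≠ "meme_sign_template" then
    if brief.contains key then brief.getD key ""
    else if artist.contains key then artist.getD key ""
    else if mood.contains key then mood.getD key ""
    else pvGenreOr genre key dflt
  else pvGenreOr genre key dflt

def apply_priority_chain_alt (creative_brief : Option (List (String × List (String × String)))) (artist_profile : Option (List (String × List (String × String)))) (mood_result : Option (Bool × String × String × String)) (genre_defaults : Option (List (String × String))) : List (String × String) :=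
  pvDefaults.map (fun kd => (kd.1, pvResolve (pvBriefOf creative_brief) (pvArtistOf artist_profile) (pvMoodOf mood_result) (pvGenreOf genre_defaults) kd.1 kd.2))

-- ===== PRECONDITION & SPEC =====
def Spec_apply_priority_chain (creative_brief : Option (List (String × List (String × String)))) (artist_profile : Option (List (String × List (String × String)))) (mood_result : Option (Bool × String × String × String)) (genre_defaults : Option (List (String × String))) (out : List (String × String)) : Prop := out = apply_priority_chain_alt creative_brief artist_profile mood_result genre_defaults
instance (creative_brief : Option (List (String × List (String × String)))) (artist_profile : Option (List (String × List (String × String)))) (mood_result : Option (Bool × String × String × String)) (genre_defaults : Option (List (String × String))) (out : List (String × String)) : Decidable (Spec_apply_priority_chain creative_brief artist_profile mood_result genre_defaults out) := by unfold Spec_apply_priority_chain; infer_instance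

-- ===== CLAIM (what is proved, stated in full; the proofs are below) =====
def Claim_equal_apply_priority_chain : Prop := ∀ (creative_brief : Option (List (String × List (String × String)))) (artist_profile : Option (List (String × List (String × String)))) (mood_result : Option (Bool × String × String × String)) (genre_defaults : Option (List (String × String))), Dom_apply_priority_chain creative_brief artist_profile mood_result genre_defaults → Spec_apply_priority_chain creative_brief artist_profile mood_result genre_defaults (apply_priority_chain creative_brief artist_profile mood_result genre_defaults)

-- ===== LEMMAS AND PROOFS =====

lemma keys_pvOverlay (src : PySem.Dict String String) (ks : List String) (r : PySem.Dict String String)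
    (h : ∀ k ∈ ks, r.contains k = true) : (pvOverlay src ks r).keys = r.keys := by
  induction ks generalizing r with
  | nil => rfl
  | cons k0 tl ih =>
    simp only [pvOverlay, List.foldl] at *
    by_cases hc : src.contains k0 = true
    · rw [if_pos hc, ih]
      · exact PySem.Dict.keys_insert_of_contains r _ (h k0 (by simp))
      · intro k hk
        rw [PySem.Dict.contains_insert]
        simp [h k (by simp [hk])]
    · rw [if_neg hc]
      exact ih r (fun k hk => h k (by simp [hk]))

lemma getD_pvOverlay_not_mem (src : PySem.Dict String String) (ks : List String) (r : PySem.Dict String String)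
    (k : String) (hk : k ∉ ks) : (pvOverlay src ks r).getD k "" = r.getD k "" := by
  induction ks generalizing r with
  | nil => rfl
  | cons k0 tl ih =>
    simp only [pvOverlay, List.foldl] at *
    by_cases hc : src.contains k0 = true
    · rw [if_pos hc, ih _ (fun h => hk (List.mem_cons.mpr (Or.inr h))),
         PySem.Dict.getD_insert_of_ne _ _ _ (fun h => hk (List.mem_cons.mpr (Or.inl h)))]
    · rw [if_neg hc, ih _ (fun h => hk (List.mem_cons.mpr (Or.inr h)))]

lemma pvOverlay_cons (src : PySem.Dict String String) (k0 : String) (tl : List String) (r : PySem.Dict String String) :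
    pvOverlay src (k0 :: tl) r = pvOverlay src tl (if src.contains k0 then r.insert k0 (src.getD k0 "") else r) := rfl

lemma getD_pvOverlay_mem (src : PySem.Dict String String) (ks : List String) (r : PySem.Dict String String)
    (k : String) (hk : k ∈ ks) (hnd : ks.Nodup) :
    (pvOverlay src ks r).getD k "" = if src.contains k then src.getD k "" else r.getD k "" := by
  induction ks generalizing r with
  | nil => cases hk
  | cons k0 tl ih =>
    obtain ⟨hnh, hnd⟩ := List.nodup_cons.mp hnd
    rw [pvOverlay_cons]
    rcases List.mem_cons.mp hk with rfl | hmem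
    · rw [getD_pvOverlay_not_mem _ _ _ _ hnh]
      by_cases hc : src.contains k = true
      · rw [if_pos hc, if_pos hc, PySem.Dict.getD_insert_self]
      · rw [if_neg hc, if_neg hc]
    · have hne : k ≠ k0 := fun h => hnh (h ▸ hmem)
      rw [ih _ hmem hnd]
      congr 1
      by_cases hc : src.contains k0 = true
      · rw [if_pos hc, PySem.Dict.getD_insert_of_ne _ _ _ hne]
      · rw [if_neg hc]

lemma pvContains_of_keys (r : PySem.Dict String String)
    (h : r.keys = ["weeter_pose", "blubby_pose", "together_pose", "meme_sign_template"])
    (k : String) (hk : k ∈ ["weeter_pose", "blubby_pose", "together_pose", "meme_sign_template"]) :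
    r.contains k = true := by
  rw [PySem.Dict.contains_eq_decide_mem_keys, h]
  simpa using hk

lemma keys_layerOv (o : Option (List (String × List (String × String)))) (name : String) (r : PySem.Dict String String)
    (h : r.keys = ["weeter_pose", "blubby_pose", "together_pose", "meme_sign_template"]) :
    (match o with
      | some c => if c ≠ [] then pvOverlay (PySem.Dict.mk ((PySem.Dict.mk c).getD name [])) pvPoseKeys r else r
      | none => r).keys = ["weeter_pose", "blubby_pose", "together_pose", "meme_sign_template"] := by
  cases o with
  | none => exact h
  | some c =>
    dsimp only
    split_ifs with hc
    · rw [keys_pvOverlay, h]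
      intro k hk
      apply pvContains_of_keys r h
      simp [pvPoseKeys, List.mem_cons] at hk
      rcases hk with rfl | rfl | rfl <;> simp
    · exact h

lemma keys_layerMood (mr : Option (Bool × String × String × String)) (r : PySem.Dict String String)
    (h : r.keys = ["weeter_pose", "blubby_pose", "together_pose", "meme_sign_template"]) :
    (match mr with
      | some (flag, w_pose, b_pose, t_pose) => if flag then pvMoodLayer w_pose b_pose t_pose r else r
      | none => r).keys = ["weeter_pose", "blubby_pose", "together_pose", "meme_sign_template"] := by
  cases mr with
  | none => exact h
  | some q =>
    obtain ⟨flag, w, b, t⟩ := q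
    dsimp only
    split_ifs with hf
    · unfold pvMoodLayer
      have step : ∀ (r : PySem.Dict String String) (c : Prop) [Decidable c] (k v : String),
          r.keys = ["weeter_pose", "blubby_pose", "together_pose", "meme_sign_template"] →
          k ∈ ["weeter_pose", "blubby_pose", "together_pose", "meme_sign_template"] →
          (if c then r.insert k v else r).keys = ["weeter_pose", "blubby_pose", "together_pose", "meme_sign_template"] := by
        intro r c _ k v hr hk
        split_ifs
        · rw [PySem.Dict.keys_insert_of_contains r v (pvContains_of_keys r hr k hk)]; exact hr
        · exact hr
      exact step _ _ _ _ (step _ _ _ _ (step _ _ _ _ h (by simp)) (by simp)) (by simp)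
    · exact h

lemma keys_layerGenre (gd : Option (List (String × String))) (r : PySem.Dict String String)
    (h : r.keys = ["weeter_pose", "blubby_pose", "together_pose", "meme_sign_template"]) :
    (match gd with
      | some g => if g ≠ [] then pvOverlay (PySem.Dict.mk g) r.keys r else r
      | none => r).keys = ["weeter_pose", "blubby_pose", "together_pose", "meme_sign_template"] := by
  cases gd with
  | none => exact h
  | some g =>
    dsimp only
    split_ifs with hg
    · rw [keys_pvOverlay, h]
      intro k hk
      exact pvContains_of_keys r h k (h ▸ hk)
    · exact h

lemma keys_pvADict (creative_brief artist_profile : Option (List (String × List (String × String)))) (mood_result : Option (Bool × String × String × String)) (genre_defaults : Option (List (String × String))) :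
    (pvADict creative_brief artist_profile mood_result genre_defaults).keys =
      ["weeter_pose", "blubby_pose", "together_pose", "meme_sign_template"] := by
  unfold pvADict
  exact keys_layerOv _ _ _ (keys_layerOv _ _ _ (keys_layerMood _ _ (keys_layerGenre _ _ (by decide))))

lemma getD_layerOv_pose (o : Option (List (String × List (String × String)))) (name : String) (r : PySem.Dict String String)
    (k : String) (hk : k ∈ pvPoseKeys) :
    (match o with
      | some c => if c ≠ [] then pvOverlay (PySem.Dict.mk ((PySem.Dict.mk c).getD name [])) pvPoseKeys r else r
      | none => r).getD k "" =
    (let src := PySem.Dict.mk (match o with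
        | some c => if c ≠ [] then (PySem.Dict.mk c).getD name [] else []
        | none => []);
      if src.contains k then src.getD k "" else r.getD k "") := by
  cases o with
  | none => simp [PySem.Dict.contains]
  | some c =>
    dsimp only
    split_ifs with hc h2 h2
    · rw [getD_pvOverlay_mem _ _ _ _ hk (by decide), if_pos h2]
    · rw [getD_pvOverlay_mem _ _ _ _ hk (by decide), if_neg h2]
    · obtain rfl : c = [] := not_not.mp hc
      simp [PySem.Dict.contains] at h2
    · rfl

lemma getD_layerOv_meme (o : Option (List (String × List (String × String)))) (name : String) (r : PySem.Dict String String) :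
    (match o with
      | some c => if c ≠ [] then pvOverlay (PySem.Dict.mk ((PySem.Dict.mk c).getD name [])) pvPoseKeys r else r
      | none => r).getD "meme_sign_template" "" = r.getD "meme_sign_template" "" := by
  cases o with
  | none => rfl
  | some c =>
    dsimp only
    split_ifs with hc
    · exact getD_pvOverlay_not_mem _ _ _ _ (by decide)
    · rfl

lemma getD_layerMood (mr : Option (Bool × String × String × String)) (r : PySem.Dict String String)
    (k : String) (hk : k ∈ ["weeter_pose", "blubby_pose", "together_pose", "meme_sign_template"]) :
    (match mr with
      | some (flag, w_pose, b_pose, t_pose) => if flag then pvMoodLayer w_pose b_pose t_pose r else r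
      | none => r).getD k "" =
    if (pvMoodOf mr).contains k then (pvMoodOf mr).getD k "" else r.getD k "" := by
  cases mr with
  | none => simp [pvMoodOf, PySem.Dict.contains_empty]
  | some q =>
    obtain ⟨flag, w, b, t⟩ := q
    cases flag with
    | false => simp [pvMoodOf, PySem.Dict.contains_empty]
    | true =>
      simp only [pvMoodOf, if_pos, List.zip, List.zipWith, List.foldl]
      simp only [List.mem_cons, List.not_mem_nil, or_false] at hk
      rcases hk with rfl | rfl | rfl | rfl <;>
        · dsimp only [pvMoodLayer]
          split_ifs <;>
            simp_all [PySem.Dict.getD_insert, PySem.Dict.contains_insert, PySem.Dict.contains_empty]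

lemma getD_layerGenre (gd : Option (List (String × String))) (r : PySem.Dict String String)
    (k : String) (hk : k ∈ r.keys) (hnd : r.keys.Nodup) :
    (match gd with
      | some g => if g ≠ [] then pvOverlay (PySem.Dict.mk g) r.keys r else r
      | none => r).getD k "" =
    if (pvGenreOf gd).contains k then (pvGenreOf gd).getD k "" else r.getD k "" := by
  cases gd with
  | none => simp [pvGenreOf, PySem.Dict.contains]
  | some g =>
    dsimp only [pvGenreOf]
    split_ifs with hg h2 h2
    · rw [getD_pvOverlay_mem _ _ _ _ hk hnd, if_pos h2]
    · rw [getD_pvOverlay_mem _ _ _ _ hk hnd, if_neg h2]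
    · obtain rfl : g = [] := not_not.mp hg
      simp [PySem.Dict.contains] at h2
    · rfl

lemma contains_pvMoodOf_meme (mr : Option (Bool × String × String × String)) :
    (pvMoodOf mr).contains "meme_sign_template" = false := by
  cases mr with
  | none => rfl
  | some q =>
    obtain ⟨flag, w, b, t⟩ := q
    cases flag with
    | false => rfl
    | true =>
      simp only [pvMoodOf, if_pos, List.zip, List.zipWith, List.foldl]
      split_ifs <;>
        simp [PySem.Dict.contains_insert, PySem.Dict.contains_empty]

lemma getD_pvADict (creative_brief artist_profile : Option (List (String × List (String × String)))) (mood_result : Option (Bool × String × String × String)) (genre_defaults : Option (List (String × String)))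
    (k dflt : String) (hk : (k, dflt) ∈ pvDefaults) :
    (pvADict creative_brief artist_profile mood_result genre_defaults).getD k "" =
      pvResolve (pvBriefOf creative_brief) (pvArtistOf artist_profile) (pvMoodOf mood_result) (pvGenreOf genre_defaults) k dflt := by
  simp only [pvDefaults, List.mem_cons, List.not_mem_nil, or_false, Prod.mk.injEq] at hk
  unfold pvADict
  rcases hk with ⟨rfl, rfl⟩ | ⟨rfl, rfl⟩ | ⟨rfl, rfl⟩ | ⟨rfl, rfl⟩
  · rw [getD_layerOv_pose creative_brief "character_override" _ "weeter_pose" (by decide),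
        getD_layerOv_pose artist_profile "weeter_blubby_override" _ "weeter_pose" (by decide),
        getD_layerMood mood_result _ "weeter_pose" (by decide),
        getD_layerGenre genre_defaults _ "weeter_pose" (by decide) (by decide)]
    simp only [pvResolve, pvBriefOf, pvArtistOf, pvGenreOr]
    rw [if_pos (show ("weeter_pose" : String) ≠ "meme_sign_template" by decide),
        show pvBase.getD "weeter_pose" "" = "assets/characters/weeter/happy/thumbs_up.png" from by decide]
  · rw [getD_layerOv_pose creative_brief "character_override" _ "blubby_pose" (by decide),
        getD_layerOv_pose artist_profile "weeter_blubby_override" _ "blubby_pose" (by decide),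
        getD_layerMood mood_result _ "blubby_pose" (by decide),
        getD_layerGenre genre_defaults _ "blubby_pose" (by decide) (by decide)]
    simp only [pvResolve, pvBriefOf, pvArtistOf, pvGenreOr]
    rw [if_pos (show ("blubby_pose" : String) ≠ "meme_sign_template" by decide),
        show pvBase.getD "blubby_pose" "" = "assets/characters/blubby/happy/excited_stars.png" from by decide]
  · rw [getD_layerOv_pose creative_brief "character_override" _ "together_pose" (by decide),
        getD_layerOv_pose artist_profile "weeter_blubby_override" _ "together_pose" (by decide),
        getD_layerMood mood_result _ "together_pose" (by decide),
        getD_layerGenre genre_defaults _ "together_pose" (by decide) (by decide)]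
    simp only [pvResolve, pvBriefOf, pvArtistOf, pvGenreOr]
    rw [if_pos (show ("together_pose" : String) ≠ "meme_sign_template" by decide),
        show pvBase.getD "together_pose" "" = "assets/characters/together/happy/thumbs_up_duo.png" from by decide]
  · rw [getD_layerOv_meme, getD_layerOv_meme,
        getD_layerMood mood_result _ "meme_sign_template" (by decide), contains_pvMoodOf_meme,
        getD_layerGenre genre_defaults _ "meme_sign_template" (by decide) (by decide)]
    simp only [Bool.false_eq_true, if_false, pvResolve, pvBriefOf, pvArtistOf, pvGenreOr]
    rw [if_neg (show ¬ (("meme_sign_template" : String) ≠ "meme_sign_template") from by decide),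
        show pvBase.getD "meme_sign_template" "" = "assets/characters/together/meme_sign/blank_sign.png" from by decide]

-- ===== VERDICT (by name: the statement is the Claim_ definition above) =====
theorem apply_priority_chain_spec : Claim_equal_apply_priority_chain := by
  intro creative_brief artist_profile mood_result genre_defaults _
  unfold Spec_apply_priority_chain apply_priority_chain apply_priority_chain_alt
  rw [PySem.Dict.items_eq_map_keys _ (by rw [keys_pvADict]; decide) ""]
  rw [keys_pvADict]
  simp only [List.map, pvDefaults]
  rw [getD_pvADict _ _ _ _ "weeter_pose" "assets/characters/weeter/happy/thumbs_up.png" (by decide),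
      getD_pvADict _ _ _ _ "blubby_pose" "assets/characters/blubby/happy/excited_stars.png" (by decide),
      getD_pvADict _ _ _ _ "together_pose" "assets/characters/together/happy/thumbs_up_duo.png" (by decide),
      getD_pvADict _ _ _ _ "meme_sign_template" "assets/characters/together/meme_sign/blank_sign.png" (by decide)]
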